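-- pv_equiv track=rewrite | github.com/kingking888/scrapy_spider-1 | test/requests_test/example/smt_isg.py | shifting
-- ===== SOURCE A (Python) =====
-- def bin2dec(string_num):
--     return int(string_num, 2)
--
-- def shifting( string_num,num_r):
--     base = [str(x) for x in range(10)] + [chr(x) for x in range(ord('A'),ord('A')+6)]
--     num = int(string_num)
--     mid = []
--     while True:
--         if num == 0: break
--         num,rem = divmod(num, 2)
--         mid.append(base[rem])
--     temp = ''.join([str(x) for x in mid[::-1]])
--     s1 = temp.zfill(32)
--     s2 = s1[num_r:]+"0"*num_r
--     s3 = bin2dec(s2)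
--     return s3
-- ===== SOURCE B (Python) =====
-- def shifting(string_num, num_r):
--     num = int(string_num)
--     width = max(32, num.bit_length())
--     return (num << num_r) & ((1 << width) - 1)
-- ===== Notes on version B (the rewrite author's own statement) =====
-- stated objective: simpler
-- what changed: Replaces the divmod-to-binary-string loop, zfill(32), string slice/pad and binary reparse with a single masked bit-shift: (num << num_r) & ((1 << max(32, num.bit_length())) - 1).
-- outside the precondition, e.g. on shifting('3', -2): A returns 3, B raises ValueError
import Mathlib
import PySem

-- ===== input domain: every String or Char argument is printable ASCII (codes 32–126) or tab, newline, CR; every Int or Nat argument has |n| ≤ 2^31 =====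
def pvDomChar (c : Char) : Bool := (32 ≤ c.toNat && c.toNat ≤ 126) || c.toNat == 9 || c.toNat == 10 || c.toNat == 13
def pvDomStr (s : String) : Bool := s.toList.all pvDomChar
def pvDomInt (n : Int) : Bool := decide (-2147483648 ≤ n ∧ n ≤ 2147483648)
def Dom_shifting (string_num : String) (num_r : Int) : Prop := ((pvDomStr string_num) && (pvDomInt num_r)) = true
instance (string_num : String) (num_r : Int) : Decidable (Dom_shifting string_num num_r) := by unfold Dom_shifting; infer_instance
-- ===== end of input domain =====

-- B replaces A's divmod-to-binary loop, zfill(32), slice/pad and binary reparse by one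
-- masked bit-shift (num << num_r) & ((1 << max(32, num.bit_length())) - 1); same value on Pre_.

-- ===== PORT A =====
-- base = [str(x) for x in range(10)] + [chr(x) for x in range(ord('A'), ord('A')+6)]
-- (Char.ofNat is chr, exact on the ASCII range 65..70 used here)
def shiftingBase : List String :=
  ((PySem.List.pyRange 0 10 1).map (fun x => PySem.Int.toStr x)) ++
  ((PySem.List.pyRange 65 71 1).map (fun x => String.ofList [Char.ofNat x.toNat]))

-- the 'while True' loop, with fuel making the recursion total (inside Pre_, num ≥ 0, the
-- fuel bitLength num + 1 is enough and the break is always reached)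
def shiftingLoop : Nat → Int → List String → List String
  | 0, _, mid => mid
  | fuel + 1, num, mid =>
    if num = 0 then mid
    else
      match PySem.Int.divmod? num 2 with
      | none => mid  -- unreachable: the divisor 2 is nonzero
      | some (q, rem) => shiftingLoop fuel q (mid ++ [PySem.List.pyGetD shiftingBase rem ""])

-- bin2dec = int(s, 2), ported by hand (step for step over the digits): exact on the
-- nonempty '0'/'1'-only strings, which are the only arguments it receives inside Pre_
def bin2dec (cs : List Char) : Int :=
  cs.foldl (fun a c => 2 * a + (if c = '1' then 1 else 0)) 0

def shifting (string_num : String) (num_r : Int) : Int :=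
  let num := (PySem.Int.ofStr? string_num).getD 0   -- int(string_num); none (ValueError) is excluded by Pre_
  let mid := shiftingLoop (PySem.Int.bitLength num + 1) num []
  let temp := PySem.Chars.join [] (((PySem.List.slice? mid none none (-1)).getD []).map String.toList)  -- ''.join([str(x) for x in mid[::-1]])
  let s1 := PySem.Chars.zfill temp 32
  let s2 := PySem.List.slice s1 (some num_r) none ++ PySem.List.pyRepeat ['0'] num_r   -- s1[num_r:] + "0"*num_r
  bin2dec s2

-- ===== PORT B =====
def shifting_alt (string_num : String) (num_r : Int) : Int :=
  let num := (PySem.Int.ofStr? string_num).getD 0   -- int(string_num); none (ValueError) is excluded by Pre_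
  let width := max 32 (PySem.Int.bitLength num)
  PySem.Int.band (num <<< num_r.toNat) ((1 <<< width) - 1)   -- (num << num_r) & ((1 << width) - 1); num_r ≥ 0 under Pre_

-- ===== PRECONDITION & SPEC =====
-- Pre_ excludes: strings int() rejects (A raises ValueError); strings parsing to a negative
-- number (A's while-loop never terminates there); and negative num_r, where A's slice
-- arithmetic happens to return a value but B's '<<' raises ValueError.
def Pre_shifting (string_num : String) (num_r : Int) : Prop :=
  0 ≤ (PySem.Int.ofStr? string_num).getD (-1) ∧ 0 ≤ num_r
instance (string_num : String) (num_r : Int) : Decidable (Pre_shifting string_num num_r) := by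
  unfold Pre_shifting; infer_instance

def pvWitness_shifting : String × Int := ("6", 3)

def Spec_shifting (string_num : String) (num_r : Int) (out : Int) : Prop := out = shifting_alt string_num num_r
instance (string_num : String) (num_r : Int) (out : Int) : Decidable (Spec_shifting string_num num_r out) := by unfold Spec_shifting; infer_instance

-- ===== CLAIM (what is proved, stated in full; the proofs are below) =====
def Claim_equal_shifting : Prop := ∀ (string_num : String) (num_r : Int), Dom_shifting string_num num_r → Pre_shifting string_num num_r → Spec_shifting string_num num_r (shifting string_num num_r)

-- ===== LEMMAS AND PROOFS =====

-- LSB-first binary digits of a natural number (the characterisation of A's loop)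
def pvBits (m : Nat) : List Char :=
  if _h : m = 0 then [] else (if m % 2 = 1 then '1' else '0') :: pvBits (m / 2)
decreasing_by exact Nat.div_lt_self (Nat.pos_of_ne_zero _h) (by norm_num)

-- MSB-first value of a binary digit string, over Nat
def pvVal (cs : List Char) : Nat := cs.foldl (fun a c => 2 * a + (if c = '1' then 1 else 0)) 0

def pvBinary (cs : List Char) : Prop := ∀ c ∈ cs, c = '0' ∨ c = '1'

theorem pvVal_acc (cs : List Char) (a : Nat) :
    cs.foldl (fun x c => 2 * x + (if c = '1' then 1 else 0)) a = a * 2 ^ cs.length + pvVal cs := by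
  induction cs generalizing a with
  | nil => simp [pvVal]
  | cons c cs ih =>
    simp only [List.foldl_cons, List.length_cons, pvVal] at *
    rw [ih, ih (2 * 0 + _)]
    ring

theorem pvVal_append (xs ys : List Char) :
    pvVal (xs ++ ys) = pvVal xs * 2 ^ ys.length + pvVal ys := by
  unfold pvVal
  rw [List.foldl_append, pvVal_acc]
  rfl

theorem pvVal_replicate_zero (k : Nat) : pvVal (List.replicate k '0') = 0 := by
  induction k with
  | zero => rfl
  | succ k ih => simpa [pvVal, List.replicate_succ, List.foldl_cons] using ih

theorem pvVal_lt (cs : List Char) (h : pvBinary cs) : pvVal cs < 2 ^ cs.length := by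
  induction cs with
  | nil => simp [pvVal]
  | cons c cs ih =>
    have hd : (if c = '1' then 1 else 0) ≤ 1 := by split <;> omega
    have := ih (fun x hx => h x (List.mem_cons_of_mem _ hx))
    have hc : pvVal (c :: cs) = (if c = '1' then 1 else 0) * 2 ^ cs.length + pvVal cs := by
      have := pvVal_append [c] cs
      simpa [pvVal] using this
    rw [hc]
    have : (if c = '1' then 1 else 0) * 2 ^ cs.length ≤ 1 * 2 ^ cs.length :=
      Nat.mul_le_mul_right _ hd
    simp only [List.length_cons, pow_succ]
    omega

theorem pvBits_val (m : Nat) : pvVal (pvBits m).reverse = m := by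
  induction m using Nat.strong_induction_on with
  | _ m ih =>
    rw [pvBits]
    by_cases h : m = 0
    · simp [h, pvVal]
    · simp only [h, dite_false, List.reverse_cons]
      rw [pvVal_append, ih (m / 2) (Nat.div_lt_self (Nat.pos_of_ne_zero h) (by norm_num))]
      have h2 : m % 2 = 0 ∨ m % 2 = 1 := by omega
      rcases h2 with h0 | h1
      · simp [pvVal, h0]; omega
      · simp [pvVal, h1]; omega

theorem pvBits_length (m : Nat) : (pvBits m).length = PySem.Int.bitLength (m : Int) := by
  induction m using Nat.strong_induction_on with
  | _ m ih =>
    rw [pvBits]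
    by_cases h : m = 0
    · subst h; simp
    · rw [PySem.Int.bitLength_natCast (Nat.pos_of_ne_zero h)]
      simp only [h, dite_false, List.length_cons]
      rw [ih (m / 2) (Nat.div_lt_self (Nat.pos_of_ne_zero h) (by norm_num))]

theorem pvBits_binary (m : Nat) : pvBinary (pvBits m) := by
  induction m using Nat.strong_induction_on with
  | _ m ih =>
    rw [pvBits]
    by_cases h : m = 0
    · simp [h, pvBinary]
    · simp only [h, dite_false]
      intro c hc
      rcases List.mem_cons.mp hc with rfl | hc
      · split <;> simp
      · exact ih (m / 2) (Nat.div_lt_self (Nat.pos_of_ne_zero h) (by norm_num)) c hc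

-- one step of the Python divmod on a nonnegative even/odd split
theorem pvDivmod_nat (m : Nat) :
    PySem.Int.divmod? (m : Int) 2 = some (((m / 2 : Nat) : Int), ((m % 2 : Nat) : Int)) := by
  have h2 : (2 : Int) ≠ 0 := by norm_num
  simp only [PySem.Int.divmod?, h2, if_false]
  have hd : ((m : Int)).fdiv 2 = ((m / 2 : Nat) : Int) := by
    rw [Int.fdiv_eq_ediv]
    have : ((0:Int) ≤ 2 ∨ (2:Int) ∣ (m : Int)) := Or.inl (by norm_num)
    rw [if_pos this]
    push_cast
    omega
  have hm : ((m : Int)).fmod 2 = ((m % 2 : Nat) : Int) := by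
    rw [Int.fmod_eq_emod]
    have : ((0:Int) ≤ 2 ∨ (2:Int) ∣ (m : Int)) := Or.inl (by norm_num)
    rw [if_pos this]
    push_cast
    omega
  rw [hd, hm]

theorem pvBase_digit (m : Nat) :
    PySem.List.pyGetD shiftingBase ((m % 2 : Nat) : Int) "" = String.ofList [if m % 2 = 1 then '1' else '0'] := by
  have h2 : m % 2 = 0 ∨ m % 2 = 1 := by omega
  rcases h2 with h0 | h1
  · rw [h0]; decide
  · rw [h1]; decide

theorem pvLoop_eq (fuel : Nat) : ∀ (m : Nat) (mid : List String), m < 2 ^ fuel →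
    shiftingLoop fuel (m : Int) mid = mid ++ (pvBits m).map (fun c => String.ofList [c]) := by
  induction fuel with
  | zero =>
    intro m mid hm
    interval_cases m
    rw [pvBits]
    simp [shiftingLoop]
  | succ fuel ih =>
    intro m mid hm
    by_cases h0 : m = 0
    · subst h0; rw [pvBits]; simp [shiftingLoop]
    · have hm' : (m : Int) ≠ 0 := by exact_mod_cast h0
      rw [shiftingLoop]
      simp only [hm', if_false]
      rw [pvDivmod_nat]
      simp only
      rw [pvBase_digit, ih (m / 2) _ (by
        have : m < 2 ^ fuel * 2 := by rw [← pow_succ]; exact hm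
        omega)]
      conv_rhs => rw [pvBits]
      simp [h0]

theorem pvZfill_eq (cs : List Char) (h : pvBinary cs) :
    PySem.Chars.zfill cs 32 = List.replicate (32 - cs.length) '0' ++ cs := by
  by_cases hle : (32 : Int) ≤ (cs.length : Int)
  · have h0 : 32 - cs.length = 0 := by omega
    simp [PySem.Chars.zfill, hle, h0]
  · have hlen : cs.length < 32 := by omega
    cases cs with
    | nil => simp [PySem.Chars.zfill]
    | cons c rest =>
      have hc : ¬ (c = '+' ∨ c = '-') := by
        rcases h c (List.mem_cons_self) with rfl | rfl <;> simp
      simp only [PySem.Chars.zfill, hle, if_false]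
      simp only [hc, if_false]
      simp only [List.length_cons]
      rfl

-- value of s1[r:] + "0"*r for a binary string s1, as a mod of a shift
theorem pvVal_shift (cs : List Char) (h : pvBinary cs) (r : Nat) :
    pvVal (cs.drop r ++ List.replicate r '0') = (pvVal cs * 2 ^ r) % 2 ^ cs.length := by
  rw [pvVal_append, pvVal_replicate_zero, List.length_replicate, Nat.add_zero]
  by_cases hr : r ≤ cs.length
  · have hsplit := pvVal_append (cs.take r) (cs.drop r)
    rw [List.take_append_drop] at hsplit
    have hdlen : (cs.drop r).length = cs.length - r := by simp
    have hdrop_lt : pvVal (cs.drop r) < 2 ^ (cs.length - r) := by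
      have := pvVal_lt (cs.drop r) (fun c hc => h c (List.mem_of_mem_drop hc))
      rwa [hdlen] at this
    have hmod : pvVal cs % 2 ^ (cs.length - r) = pvVal (cs.drop r) := by
      rw [hsplit, hdlen, Nat.mul_comm, Nat.mul_add_mod, Nat.mod_eq_of_lt hdrop_lt]
    have hpow : 2 ^ cs.length = 2 ^ (cs.length - r) * 2 ^ r := by
      rw [← pow_add]
      congr 1
      omega
    rw [hpow, Nat.mul_mod_mul_right, hmod]
  · have : cs.drop r = [] := List.drop_eq_nil_of_le (by omega)
    rw [this]
    have hdvd : 2 ^ cs.length ∣ pvVal cs * 2 ^ r :=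
      Dvd.dvd.mul_left (pow_dvd_pow 2 (by omega)) _
    rw [Nat.mod_eq_zero_of_dvd hdvd]
    simp [pvVal]

theorem pvBin2dec_eq (cs : List Char) : bin2dec cs = (pvVal cs : Int) := by
  suffices h : ∀ (a : Nat), cs.foldl (fun x c => 2 * x + (if c = '1' then 1 else 0)) ((a : Nat) : Int)
      = ((cs.foldl (fun x c => 2 * x + (if c = '1' then 1 else 0)) a : Nat) : Int) by
    simpa [bin2dec, pvVal] using h 0
  induction cs with
  | nil => intro a; simp
  | cons c cs ih =>
    intro a
    simp only [List.foldl_cons]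
    have : (2 * (a : Int) + (if c = '1' then 1 else 0)) = (((2 * a + (if c = '1' then 1 else 0) : Nat) : Nat) : Int) := by
      push_cast; split <;> simp
    rw [this, ih]

-- ===== VERDICT (by name: the statement is the Claim_ definition above) =====
theorem shifting_spec : Claim_equal_shifting := by
  intro string_num num_r _hdom hpre
  obtain ⟨hnum, hr⟩ := hpre
  -- the parsed integer is a nonnegative n = (m : Int)
  obtain ⟨n, hn⟩ : ∃ n, PySem.Int.ofStr? string_num = some n := by
    cases h : PySem.Int.ofStr? string_num with
    | none => rw [h] at hnum; simp at hnum
    | some n => exact ⟨n, rfl⟩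
  rw [hn] at hnum
  simp only [Option.getD_some] at hnum
  obtain ⟨m, rfl⟩ : ∃ m : Nat, n = (m : Int) := ⟨n.toNat, (Int.toNat_of_nonneg hnum).symm⟩
  obtain ⟨r, rfl⟩ : ∃ r : Nat, num_r = (r : Int) := ⟨num_r.toNat, (Int.toNat_of_nonneg hr).symm⟩
  unfold Spec_shifting shifting shifting_alt
  rw [hn]
  simp only [Option.getD_some]
  -- the A side, step by step
  have hfuel : m < 2 ^ (PySem.Int.bitLength (m : Int) + 1) := by
    have h1 := PySem.Int.lt_two_pow_bitLength (m : Int)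
    have h2 : (2:Nat) ^ PySem.Int.bitLength (m : Int) ≤ 2 ^ (PySem.Int.bitLength (m : Int) + 1) :=
      Nat.pow_le_pow_right (by norm_num) (by omega)
    simpa using lt_of_lt_of_le h1 h2
  rw [pvLoop_eq _ m [] hfuel]
  rw [List.nil_append, PySem.List.slice?_none_none_neg_one, Option.getD_some, ← List.map_reverse]
  rw [List.map_map]
  have hmapeq : ((fun x => String.toList x) ∘ fun c => String.ofList [c]) = fun c => [c] := by
    funext c; simp
  rw [hmapeq, PySem.Chars.join_nil_singletons]
  set bs := (pvBits m).reverse with hbs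
  have hbsbin : pvBinary bs := fun c hc => pvBits_binary m c (List.mem_reverse.mp hc)
  have hbsval : pvVal bs = m := pvBits_val m
  have hbslen : bs.length = PySem.Int.bitLength (m : Int) := by
    rw [hbs, List.length_reverse]; exact pvBits_length m
  rw [pvZfill_eq bs hbsbin]
  set s1 := List.replicate (32 - bs.length) '0' ++ bs with hs1
  have hs1bin : pvBinary s1 := by
    intro c hc
    rcases List.mem_append.mp hc with hc | hc
    · left; exact List.eq_of_mem_replicate hc
    · exact hbsbin c hc
  have hs1val : pvVal s1 = m := by
    rw [hs1, pvVal_append, pvVal_replicate_zero, hbsval]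
    omega
  have hs1len : s1.length = max 32 (PySem.Int.bitLength (m : Int)) := by
    rw [hs1]
    simp only [List.length_append, List.length_replicate, hbslen]
    omega
  rw [PySem.List.slice_from _ (by positivity : (0:Int) ≤ (r : Int)), PySem.List.pyRepeat_singleton]
  simp only [Int.toNat_natCast]
  rw [pvBin2dec_eq, pvVal_shift s1 hs1bin r, hs1val, hs1len]
  -- the B side
  have hcast1 : ((m : Int)) <<< r = ((m * 2 ^ r : Nat) : Int) := by
    rw [Int.shiftLeft_eq]; push_cast; ring
  have hone : (1:Nat) ≤ 2 ^ max 32 (PySem.Int.bitLength (m : Int)) := Nat.one_le_two_pow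
  have hcast2 : (((1 <<< max 32 (PySem.Int.bitLength (m : Int)) : Nat) : Int)) - 1
      = ((2 ^ max 32 (PySem.Int.bitLength (m : Int)) - 1 : Nat) : Int) := by
    rw [Nat.shiftLeft_eq, one_mul]
    push_cast [hone]
    ring
  rw [hcast1, hcast2, PySem.Int.band_of_nonneg (Int.natCast_nonneg _) (Int.natCast_nonneg _)]
  rw [Int.toNat_natCast, Int.toNat_natCast, Nat.and_two_pow_sub_one_eq_mod]
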